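-- pv_equiv track=rewrite | github.com/federicalaurino/TDDkata | kata.py | add_6
-- ===== SOURCE A (Python) =====
-- class NegativesError(Exception):
-- 	"""Exception printing negative numbers if present"""
-- 	def __init__(self, neg):
-- 		self.msg = "negatives not allowed: {}".format(",".join(neg))
-- 		super(NegativesError,self).__init__(self.msg)
--
-- def add_6(numbers: str) -> int:
-- 	res = 0
-- 	if numbers: # if not case 0
-- 		lines = numbers.split("\n")
-- 		# choose delimiter
-- 		delimiter = "," # default
-- 		if lines[0][0:2] == "//":
-- 			delimiter = lines[0][2::] # new delimiter
-- 			lines = lines[1::] # lines to be read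
-- 		# sum numbers if no negatives
-- 		negatives = []
-- 		for l in lines:
-- 			for n in l.split(delimiter):
-- 				if (int(n)<=1000) & (not negatives): # small numbers ignored and no negatives so far
-- 					res += int(n)
-- 				if(int(n)<0):
-- 					negatives.append(n)
-- 		if negatives:
-- 			raise NegativesError(negatives)
-- 	return res
-- ===== SOURCE B (Python) =====
-- class NegativesError(Exception):
--     """Exception printing negative numbers if present"""
--     def __init__(self, neg):
--         self.msg = "negatives not allowed: {}".format(",".join(neg))
--         super(NegativesError, self).__init__(self.msg)
--
-- def add_6(numbers: str) -> int:
--     if not numbers: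
--         return 0
--     lines = numbers.split("\n")
--     delimiter = ","
--     if lines[0][0:2] == "//":
--         delimiter, lines = lines[0][2:], lines[1:]
--     tokens = [t for line in lines for t in line.split(delimiter)]
--     nums = [int(t) for t in tokens]
--     negatives = [t for t, v in zip(tokens, nums) if v < 0]
--     if negatives:
--         raise NegativesError(negatives)
--     return sum(v for v in nums if v <= 1000)
-- ===== Notes on version B (the rewrite author's own statement) =====
-- stated objective: simpler
-- what changed: Replaces the nested accumulator loop with its negatives-seen guard by three flat phases: tokenize with a flat comprehension, parse all tokens, collect negatives, then sum the filtered values with sum().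
import Mathlib
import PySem

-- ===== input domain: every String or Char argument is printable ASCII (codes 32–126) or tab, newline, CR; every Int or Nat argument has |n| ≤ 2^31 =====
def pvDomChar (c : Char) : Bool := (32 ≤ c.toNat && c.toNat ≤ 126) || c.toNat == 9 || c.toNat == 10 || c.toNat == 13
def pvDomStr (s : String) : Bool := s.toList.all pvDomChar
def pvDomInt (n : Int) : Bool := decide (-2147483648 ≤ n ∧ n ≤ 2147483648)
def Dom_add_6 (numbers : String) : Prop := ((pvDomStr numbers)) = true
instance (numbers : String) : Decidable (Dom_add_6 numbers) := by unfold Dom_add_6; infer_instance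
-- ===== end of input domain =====

-- B replaces A's nested loop with a negatives-seen guard by flat phases (tokenize, parse,
-- collect negatives, sum the filtered values); same results wherever A returns normally.

-- ===== PORT A =====
-- inner loop body of A: res accumulation guarded by "no negatives so far", then negatives append
def addStepA (st : Int × List String) (n : String) : Int × List String :=
  let v := (PySem.Int.ofStr? n).getD 0
  let st1 := if v ≤ 1000 ∧ st.2 = [] then (st.1 + v, st.2) else st
  if v < 0 then (st1.1, st1.2 ++ [n]) else st1

def add_6 (numbers : String) : Int :=
  if numbers == "" then 0
  else
    let lines := (PySem.Str.split? numbers "\n").getD []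
    let hdr := PySem.Str.slice (lines.headD "") (some 0) (some 2) == "//"
    let delimiter := if hdr then PySem.Str.slice (lines.headD "") (some 2) none else ","
    let lines := if hdr then lines.tail else lines
    let st := lines.foldl
      (fun st l => ((PySem.Str.split? l delimiter).getD []).foldl addStepA st)
      ((0 : Int), ([] : List String))
    st.1  -- 'raise NegativesError' when st.2 ≠ [] is excluded by Pre_add_6

-- ===== PORT B =====
def add_6_alt (numbers : String) : Int :=
  if numbers == "" then 0
  else
    let lines := (PySem.Str.split? numbers "\n").getD []
    let hdr := PySem.Str.slice (lines.headD "") (some 0) (some 2) == "//"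
    let delimiter := if hdr then PySem.Str.slice (lines.headD "") (some 2) none else ","
    let body := if hdr then lines.tail else lines
    let tokens := body.flatMap (fun l => (PySem.Str.split? l delimiter).getD [])
    let nums := tokens.map (fun t => (PySem.Int.ofStr? t).getD 0)
    -- 'raise NegativesError' when some num < 0 is excluded by Pre_add_6
    (nums.filter (fun v => v ≤ 1000)).sum

-- ===== PRECONDITION & SPEC =====
-- Pre_ excludes exactly the inputs where A raises: an empty delimiter used on a nonempty body
-- (ValueError from split), a token int() rejects (ValueError), or a negative token (NegativesError).
def Pre_add_6 (numbers : String) : Prop :=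
  numbers = "" ∨
  (let lines := (PySem.Str.split? numbers "\n").getD []
   let hdr := PySem.Str.slice (lines.headD "") (some 0) (some 2) == "//"
   let delimiter := if hdr then PySem.Str.slice (lines.headD "") (some 2) none else ","
   let body := if hdr then lines.tail else lines
   (body = [] ∨ delimiter ≠ "") ∧
   ∀ l ∈ body, ∀ t ∈ (PySem.Str.split? l delimiter).getD [],
     (PySem.Int.ofStr? t).isSome = true ∧ 0 ≤ (PySem.Int.ofStr? t).getD 0)
instance (numbers : String) : Decidable (Pre_add_6 numbers) := by unfold Pre_add_6; infer_instance

def pvWitness_add_6 : String := "//;\n1;2;1001"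

def Spec_add_6 (numbers : String) (out : Int) : Prop := out = add_6_alt numbers
instance (numbers : String) (out : Int) : Decidable (Spec_add_6 numbers out) := by unfold Spec_add_6; infer_instance

-- ===== CLAIM (what is proved, stated in full; the proofs are below) =====
def Claim_equal_add_6 : Prop := ∀ (numbers : String), Dom_add_6 numbers → Pre_add_6 numbers → Spec_add_6 numbers (add_6 numbers)

-- ===== LEMMAS AND PROOFS =====

-- A's token loop, over tokens that all parse to nonnegative ints, keeps negatives empty and
-- adds exactly the values ≤ 1000.
lemma addStepA_fold (ts : List String) (acc : Int)
    (h : ∀ t ∈ ts, 0 ≤ (PySem.Int.ofStr? t).getD 0) :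
    ts.foldl addStepA (acc, []) =
      (acc + ((ts.map (fun t => (PySem.Int.ofStr? t).getD 0)).filter (fun v => v ≤ 1000)).sum, []) := by
  induction ts generalizing acc with
  | nil => simp
  | cons t ts ih =>
    have ht : 0 ≤ (PySem.Int.ofStr? t).getD 0 := h t (by simp)
    have hrest : ∀ u ∈ ts, 0 ≤ (PySem.Int.ofStr? u).getD 0 := fun u hu => h u (by simp [hu])
    simp only [List.foldl_cons]
    have hstep : addStepA (acc, []) t =
        (acc + (if (PySem.Int.ofStr? t).getD 0 ≤ 1000 then (PySem.Int.ofStr? t).getD 0 else 0), []) := by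
      unfold addStepA
      by_cases h1000 : (PySem.Int.ofStr? t).getD 0 ≤ 1000 <;> (simp [h1000]; omega)
    rw [hstep, ih _ hrest]
    by_cases h1000 : (PySem.Int.ofStr? t).getD 0 ≤ 1000 <;> simp [h1000] <;> ring

-- nested fold over lines = fold over the flattened token list
lemma foldl_flatMap_tokens {α β γ : Type} (f : γ → β → γ) (g : α → List β)
    (ls : List α) (init : γ) :
    ls.foldl (fun st l => (g l).foldl f st) init = (ls.flatMap g).foldl f init := by
  induction ls generalizing init with
  | nil => rfl
  | cons l ls ih => simp [List.foldl_append, ih]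

-- ===== VERDICT (by name: the statement is the Claim_ definition above) =====
theorem add_6_spec : Claim_equal_add_6 := by
  intro numbers _ hpre
  unfold Spec_add_6 add_6 add_6_alt
  by_cases hempty : numbers = ""
  · simp [hempty]
  · have hne : (numbers == "") = false := by simp [hempty]
    simp only [hne, Bool.false_eq_true, if_false]
    rcases hpre with h | h
    · exact absurd h hempty
    simp only at h
    obtain ⟨-, htok⟩ := h
    set lines := (PySem.Str.split? numbers "\n").getD [] with hlines
    set hdr := (PySem.Str.slice (lines.headD "") (some 0) (some 2) == "//") with hhdr
    set delimiter := if hdr then PySem.Str.slice (lines.headD "") (some 2) none else "," with hdelim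
    set body := if hdr then lines.tail else lines with hbody
    rw [foldl_flatMap_tokens]
    rw [addStepA_fold]
    · simp [List.map_flatMap]
    · intro t htmem
      rw [List.mem_flatMap] at htmem
      obtain ⟨l, hl, htl⟩ := htmem
      exact (htok l hl t htl).2
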